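-- pv_equiv track=rewrite | github.com/MusicPlayerDaemon/MPD | python/build/cmdline.py | concatenate_cmdline_variables
-- ===== SOURCE A (Python) =====
-- def concatenate_cmdline_variables(src, names):
--     """Find duplicate variable declarations on the given source list, and
--     concatenate the values of those in the 'names' list."""
--
--     # the result list being constructed
--     dest = []
--
--     # a map of variable name to destination list index
--     positions = {}
--
--     for item in src:
--         i = item.find('=')
--         if i > 0:
--             # it's a variable
--             name = item[:i]
--             if name in names:
--                 # it's a known variable
--                 if name in positions:
--                     # already specified: concatenate instead of
--                     # appending it
--                     dest[positions[name]] += ' ' + item[i + 1:]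
--                     continue
--                 else:
--                     # not yet seen: append it and remember the list
--                     # index
--                     positions[name] = len(dest)
--         dest.append(item)
--
--     return dest
-- ===== SOURCE B (Python) =====
-- def concatenate_cmdline_variables(src, names):
--     """Find duplicate variable declarations on the given source list, and
--     concatenate the values of those in the 'names' list."""
--     # pass 1: accumulate the concatenated text of each known variable
--     acc = {}
--     for item in src:
--         i = item.find('=')
--         if i > 0:
--             name = item[:i]
--             if name in names:
--                 if name in acc:
--                     acc[name] += ' ' + item[i + 1:]
--                 else:
--                     acc[name] = item
--     # pass 2: emit each known variable once, at its first position, with its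
--     # accumulated text; everything else passes through unchanged
--     dest = []
--     emitted = set()
--     for item in src:
--         i = item.find('=')
--         if i > 0:
--             name = item[:i]
--             if name in names:
--                 if name in emitted:
--                     continue
--                 emitted.add(name)
--                 dest.append(acc[name])
--                 continue
--         dest.append(item)
--     return dest
-- ===== Notes on version B (the rewrite author's own statement) =====
-- stated objective: alternative
-- what changed: A's single mutate-as-you-go pass (appending to dest and patching earlier dest entries through a name-to-index map) is replaced by a two-pass build-table-then-emit structure: pass 1 builds a dict from each known variable name to its fully concatenated string, pass 2 emits each known variable once at its first position and passes everything else through.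
import Mathlib
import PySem

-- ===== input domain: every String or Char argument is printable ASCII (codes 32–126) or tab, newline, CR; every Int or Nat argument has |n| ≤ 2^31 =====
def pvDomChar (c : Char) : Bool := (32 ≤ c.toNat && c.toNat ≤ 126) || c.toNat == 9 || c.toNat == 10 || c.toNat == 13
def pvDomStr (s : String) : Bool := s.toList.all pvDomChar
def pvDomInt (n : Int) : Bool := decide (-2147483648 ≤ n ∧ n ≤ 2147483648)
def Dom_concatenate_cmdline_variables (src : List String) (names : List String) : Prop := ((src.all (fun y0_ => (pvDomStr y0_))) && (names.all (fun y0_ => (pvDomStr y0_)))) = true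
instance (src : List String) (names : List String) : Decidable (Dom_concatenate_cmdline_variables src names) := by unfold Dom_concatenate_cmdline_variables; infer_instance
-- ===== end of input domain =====

-- B replaces A's single mutate-as-you-go pass (with a name→dest-index map) by two passes:
-- build a name→accumulated-string table, then emit each known variable once; same return value, similar cost ("alternative").

-- ===== PORT A =====
-- loop body of A: dest/positions state; dest[positions[name]] += ' ' + item[i+1:] is read-then-set
-- (the index stored in positions is always in range, so the getD/set totalisation is exact).
def pvStepA (names : List String) (st : List String × PySem.Dict String Nat) (item : String) :
    List String × PySem.Dict String Nat :=
  let i := PySem.Str.find item "="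
  if i > 0 then
    let name := PySem.Str.slice item none (some i)
    if names.contains name then
      match PySem.Dict.get? st.2 name with
      | some idx =>
          (st.1.set idx (st.1.getD idx "" ++ " " ++ PySem.Str.slice item (some (i + 1)) none), st.2)
      | none => (st.1 ++ [item], PySem.Dict.insert st.2 name st.1.length)
    else (st.1 ++ [item], st.2)
  else (st.1 ++ [item], st.2)

def concatenate_cmdline_variables (src : List String) (names : List String) : List String :=
  (src.foldl (pvStepA names) ([], PySem.Dict.empty)).1

-- ===== PORT B =====
-- first pass of B: accumulate the concatenated text of each known variable
def pvStepAcc (names : List String) (acc : PySem.Dict String String) (item : String) :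
    PySem.Dict String String :=
  let i := PySem.Str.find item "="
  if i > 0 then
    let name := PySem.Str.slice item none (some i)
    if names.contains name then
      match PySem.Dict.get? acc name with
      | some v => PySem.Dict.insert acc name (v ++ " " ++ PySem.Str.slice item (some (i + 1)) none)
      | none => PySem.Dict.insert acc name item
    else acc
  else acc

-- second pass of B: emit each known variable once (acc[name] is always present there,
-- so the getD totalisation is exact)
def pvStepEmit (names : List String) (acc : PySem.Dict String String)
    (st : List String × PySem.Set String) (item : String) : List String × PySem.Set String :=
  let i := PySem.Str.find item "="
  if i > 0 then
    let name := PySem.Str.slice item none (some i)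
    if names.contains name then
      if PySem.Set.contains st.2 name then st
      else (st.1 ++ [PySem.Dict.getD acc name ""], PySem.Set.add st.2 name)
    else (st.1 ++ [item], st.2)
  else (st.1 ++ [item], st.2)

def concatenate_cmdline_variables_alt (src : List String) (names : List String) : List String :=
  let acc := src.foldl (pvStepAcc names) PySem.Dict.empty
  (src.foldl (pvStepEmit names acc) ([], PySem.Set.empty)).1

-- ===== PRECONDITION & SPEC =====
def Spec_concatenate_cmdline_variables (src : List String) (names : List String) (out : List String) : Prop := out = concatenate_cmdline_variables_alt src names
instance (src : List String) (names : List String) (out : List String) : Decidable (Spec_concatenate_cmdline_variables src names out) := by unfold Spec_concatenate_cmdline_variables; infer_instance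

-- ===== CLAIM (what is proved, stated in full; the proofs are below) =====
def Claim_equal_concatenate_cmdline_variables : Prop := ∀ (src : List String) (names : List String), Dom_concatenate_cmdline_variables src names → Spec_concatenate_cmdline_variables src names (concatenate_cmdline_variables src names)

-- ===== LEMMAS AND PROOFS =====

-- abstract view of one item: `some name` if it is a known variable, `none` otherwise
def pvKey (names : List String) (item : String) : Option String :=
  let i := PySem.Str.find item "="
  if i > 0 then
    let name := PySem.Str.slice item none (some i)
    if names.contains name then some name else none
  else none

-- the text appended on a repeated occurrence: ' ' + item[i+1:]
def pvTail (item : String) : String :=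
  " " ++ PySem.Str.slice item (some (PySem.Str.find item "=" + 1)) none

-- abstract step functions (k = pvKey names, t = pvTail)
def pvAStep (k : String → Option String) (t : String → String)
    (st : List String × PySem.Dict String Nat) (item : String) :
    List String × PySem.Dict String Nat :=
  match k item with
  | none => (st.1 ++ [item], st.2)
  | some n =>
    match PySem.Dict.get? st.2 n with
    | some idx => (st.1.set idx (st.1.getD idx "" ++ t item), st.2)
    | none => (st.1 ++ [item], PySem.Dict.insert st.2 n st.1.length)

def pvAccStep (k : String → Option String) (t : String → String)
    (acc : PySem.Dict String String) (item : String) : PySem.Dict String String :=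
  match k item with
  | none => acc
  | some n =>
    match PySem.Dict.get? acc n with
    | some v => PySem.Dict.insert acc n (v ++ t item)
    | none => PySem.Dict.insert acc n item

def pvEStep (k : String → Option String) (acc : PySem.Dict String String)
    (st : List String × PySem.Set String) (item : String) : List String × PySem.Set String :=
  match k item with
  | none => (st.1 ++ [item], st.2)
  | some n =>
    if n ∈ st.2 then st
    else (st.1 ++ [PySem.Dict.getD acc n ""], PySem.Set.add st.2 n)

theorem pvStepA_eq (names : List String) (st : List String × PySem.Dict String Nat) (item : String) :
    pvStepA names st item = pvAStep (pvKey names) pvTail st item := by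
  unfold pvStepA pvAStep pvKey pvTail
  dsimp only
  split_ifs <;> simp [String.append_assoc]

theorem pvStepAcc_eq (names : List String) (acc : PySem.Dict String String) (item : String) :
    pvStepAcc names acc item = pvAccStep (pvKey names) pvTail acc item := by
  unfold pvStepAcc pvAccStep pvKey pvTail
  dsimp only
  split_ifs <;> simp [String.append_assoc]

theorem pvStepEmit_eq (names : List String) (acc : PySem.Dict String String)
    (st : List String × PySem.Set String) (item : String) :
    pvStepEmit names acc st item = pvEStep (pvKey names) acc st item := by
  unfold pvStepEmit pvEStep pvKey
  dsimp only
  split_ifs with h1 h2 h3 <;> simp_all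

-- the emitted suffix of B's second pass, as a function of the table and the emitted set
def pvTailOut (k : String → Option String) (acc : PySem.Dict String String)
    (em : PySem.Set String) : List String → List String
  | [] => []
  | x :: xs =>
    match k x with
    | none => x :: pvTailOut k acc em xs
    | some n =>
      if n ∈ em then pvTailOut k acc em xs
      else PySem.Dict.getD acc n "" :: pvTailOut k acc (PySem.Set.add em n) xs

-- the emitted set after a pass
def pvEmAcc (k : String → Option String) (em : PySem.Set String) : List String → PySem.Set String
  | [] => em
  | x :: xs =>
    match k x with
    | none => pvEmAcc k em xs
    | some n => pvEmAcc k (PySem.Set.add em n) xs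

-- the output index at which variable n is (first) emitted, if any
def pvPos (k : String → Option String) (em : PySem.Set String) (n : String) :
    List String → Option Nat
  | [] => none
  | x :: xs =>
    match k x with
    | none => (pvPos k em n xs).map (· + 1)
    | some m =>
      if m ∈ em then pvPos k em n xs
      else if m = n then some 0
      else (pvPos k (PySem.Set.add em m) n xs).map (· + 1)

theorem pvEStep_out (k : String → Option String) (acc : PySem.Dict String String)
    (p : List String) : ∀ (dest : List String) (em : PySem.Set String),
    (p.foldl (pvEStep k acc) (dest, em)) = (dest ++ pvTailOut k acc em p, pvEmAcc k em p) := by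
  induction p with
  | nil => simp [pvTailOut, pvEmAcc]
  | cons x xs ih =>
    intro dest em
    simp only [List.foldl_cons, pvEStep, pvTailOut, pvEmAcc]
    cases hk : k x with
    | none => simp [ih, List.append_assoc]
    | some n =>
      by_cases hm : n ∈ em
      · simp [hm, ih]
      · simp [hm, ih, List.append_assoc]

theorem pvCongr (k : String → Option String) (acc acc' : PySem.Dict String String)
    (p : List String) : ∀ (em : PySem.Set String),
    (∀ m, m ∉ em → PySem.Dict.getD acc m "" = PySem.Dict.getD acc' m "") →
    pvTailOut k acc em p = pvTailOut k acc' em p := by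
  induction p with
  | nil => simp [pvTailOut]
  | cons x xs ih =>
    intro em h
    cases hk : k x with
    | none => simp [pvTailOut, hk, ih em h]
    | some n =>
      by_cases hm : n ∈ em
      · simp [pvTailOut, hk, hm, ih em h]
      · have h' : ∀ m, m ∉ em ++ [n] → PySem.Dict.getD acc m "" = PySem.Dict.getD acc' m "" := fun m hm' =>
          h m (fun hmem => hm' (List.mem_append.mpr (Or.inl hmem)))
        simp [pvTailOut, hk, hm, h n hm, ih _ h']

theorem pvKEY (k : String → Option String) (acc : PySem.Dict String String) (n : String)
    (v : String) (p : List String) : ∀ (em : PySem.Set String), n ∉ em →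
    pvTailOut k (PySem.Dict.insert acc n v) em p =
      (match pvPos k em n p with
       | some i => (pvTailOut k acc em p).set i v
       | none => pvTailOut k acc em p) := by
  induction p with
  | nil => intro em _; simp [pvTailOut, pvPos]
  | cons x xs ih =>
    intro em hn
    cases hk : k x with
    | none =>
      cases hp : pvPos k em n xs with
      | none => simp [pvTailOut, pvPos, hk, hp, ih em hn]
      | some i => simp [pvTailOut, pvPos, hk, hp, ih em hn]
    | some m =>
      by_cases hm : m ∈ em
      · simp [pvTailOut, pvPos, hk, hm, ih em hn]
      · by_cases hmn : m = n
        · subst hmn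
          have hc : pvTailOut k (PySem.Dict.insert acc m v) (PySem.Set.add em m) xs
              = pvTailOut k acc (PySem.Set.add em m) xs := by
            apply pvCongr
            intro m' hm'
            have hne : m' ≠ m := fun he => hm' ((PySem.Set.mem_add em m m').mpr (Or.inr he))
            exact PySem.Dict.getD_insert_of_ne acc v "" hne
          rw [PySem.Set.add_of_not_mem hm] at hc
          simp [pvTailOut, pvPos, hk, hm, hc, PySem.Dict.getD_insert_self]
        · have hn' : n ∉ PySem.Set.add em m := fun hmem => by
            rcases (PySem.Set.mem_add em m n).mp hmem with h | h
            · exact hn h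
            · exact hmn h.symm
          have hget : PySem.Dict.getD (PySem.Dict.insert acc n v) m ""
              = PySem.Dict.getD acc m "" := PySem.Dict.getD_insert_of_ne acc v "" hmn
          have hih := ih _ hn'
          rw [PySem.Set.add_of_not_mem hm] at hn' hih
          cases hp : pvPos k (em ++ [m]) n xs with
          | none => simp [pvTailOut, pvPos, hk, hm, hmn, hp, hih, hget]
          | some i => simp [pvTailOut, pvPos, hk, hm, hmn, hp, hih, hget]

theorem pvTailOut_append (k : String → Option String) (acc : PySem.Dict String String)
    (p q : List String) : ∀ (em : PySem.Set String),
    pvTailOut k acc em (p ++ q) = pvTailOut k acc em p ++ pvTailOut k acc (pvEmAcc k em p) q := by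
  induction p with
  | nil => intro em; simp [pvTailOut, pvEmAcc]
  | cons x xs ih =>
    intro em
    cases hk : k x with
    | none => simp [pvTailOut, pvEmAcc, hk, ih em]
    | some n =>
      by_cases hm : n ∈ em
      · simp [pvTailOut, pvEmAcc, hk, hm, ih em]
      · simp [pvTailOut, pvEmAcc, hk, hm, ih (em ++ [n])]

theorem pvPos_append (k : String → Option String) (n : String) (p q : List String) :
    ∀ (em : PySem.Set String) (acc : PySem.Dict String String),
    pvPos k em n (p ++ q) =
      (pvPos k em n p).or ((pvPos k (pvEmAcc k em p) n q).map (· + (pvTailOut k acc em p).length)) := by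
  induction p with
  | nil => intro em acc; simp [pvPos, pvEmAcc, pvTailOut]
  | cons x xs ih =>
    intro em acc
    cases hk : k x with
    | none =>
      have hih := ih em acc
      cases hp : pvPos k em n xs with
      | some i => rw [hp] at hih; simp [pvPos, pvEmAcc, pvTailOut, hk, hih, hp]
      | none =>
        rw [hp] at hih
        cases hq : pvPos k (pvEmAcc k em xs) n q with
        | none => rw [hq] at hih; simp_all [pvPos, pvEmAcc, pvTailOut]
        | some j =>
          rw [hq] at hih
          simp only [Option.none_or, Option.map_some] at hih
          simp [pvPos, pvEmAcc, pvTailOut, hk, hp, hq, hih]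
          omega
    | some m =>
      by_cases hm : m ∈ em
      · simp [pvPos, pvEmAcc, pvTailOut, hk, hm, ih em acc]
      · by_cases hmn : m = n
        · subst hmn; simp [pvPos, pvEmAcc, pvTailOut, hk, hm]
        · have hih := ih (em ++ [m]) acc
          cases hp : pvPos k (em ++ [m]) n xs with
          | some i => rw [hp] at hih; simp [pvPos, pvEmAcc, pvTailOut, hk, hm, hmn, hih, hp]
          | none =>
            rw [hp] at hih
            cases hq : pvPos k (pvEmAcc k (em ++ [m]) xs) n q with
            | none => rw [hq] at hih; simp_all [pvPos, pvEmAcc, pvTailOut]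
            | some j =>
              rw [hq] at hih
              simp only [Option.none_or, Option.map_some] at hih
              simp [pvPos, pvEmAcc, pvTailOut, hk, hm, hmn, hp, hq, hih]
              omega

theorem pvEmAcc_mono (k : String → Option String) (n : String) (p : List String) :
    ∀ (em : PySem.Set String), n ∈ em → n ∈ pvEmAcc k em p := by
  induction p with
  | nil => intro em h; exact h
  | cons x xs ih =>
    intro em h
    cases hk : k x with
    | none => simpa [pvEmAcc, hk] using ih em h
    | some m =>
      simpa [pvEmAcc, hk] using ih _ ((PySem.Set.mem_add em m n).mpr (Or.inl h))

theorem pvEmAcc_mem (k : String → Option String) (n : String) (p : List String) :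
    ∀ (em : PySem.Set String), n ∉ em →
    (n ∈ pvEmAcc k em p ↔ pvPos k em n p ≠ none) := by
  induction p with
  | nil => intro em hn; simp [pvEmAcc, pvPos, hn]
  | cons x xs ih =>
    intro em hn
    cases hk : k x with
    | none => simp [pvEmAcc, pvPos, hk, ih em hn]
    | some m =>
      by_cases hm : m ∈ em
      · simp [pvEmAcc, pvPos, hk, hm, ih em hn]
      · by_cases hmn : m = n
        · subst hmn
          have hmem : m ∈ pvEmAcc k (em ++ [m]) xs :=
            pvEmAcc_mono k m xs (em ++ [m]) (List.mem_append.mpr (Or.inr (List.mem_singleton.mpr rfl)))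
          simp [pvEmAcc, pvPos, hk, hm, hmem]
        · have hn' : n ∉ em ++ [m] := fun hmem => by
            rcases List.mem_append.mp hmem with h | h
            · exact hn h
            · exact hmn (List.mem_singleton.mp h).symm
          simp [pvEmAcc, pvPos, hk, hm, hmn, ih (em ++ [m]) hn']

theorem pvPos_inj (k : String → Option String) (n₁ n₂ : String) (p : List String) :
    ∀ (em : PySem.Set String) (i : Nat),
    pvPos k em n₁ p = some i → pvPos k em n₂ p = some i → n₁ = n₂ := by
  induction p with
  | nil => intro em i h _; simp [pvPos] at h
  | cons x xs ih =>
    intro em i h₁ h₂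
    cases hk : k x with
    | none =>
      simp only [pvPos, hk, Option.map_eq_some_iff] at h₁ h₂
      rcases h₁ with ⟨j₁, hj₁, he₁⟩
      rcases h₂ with ⟨j₂, hj₂, he₂⟩
      have hj : j₁ = j₂ := by omega
      exact ih em j₁ hj₁ (hj ▸ hj₂)
    | some m =>
      by_cases hm : m ∈ em
      · simp only [pvPos, hk, if_pos hm] at h₁ h₂
        exact ih em i h₁ h₂
      · by_cases h₁n : m = n₁ <;> by_cases h₂n : m = n₂
        · exact h₁n ▸ h₂n ▸ rfl
        · exfalso
          simp only [pvPos, hk, if_neg hm, if_pos h₁n, if_neg h₂n, Option.some_inj,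
            Option.map_eq_some_iff] at h₁ h₂
          rcases h₂ with ⟨j₂, hj₂, he₂⟩
          omega
        · exfalso
          simp only [pvPos, hk, if_neg hm, if_neg h₁n, if_pos h₂n, Option.some_inj,
            Option.map_eq_some_iff] at h₁ h₂
          rcases h₁ with ⟨j₁, hj₁, he₁⟩
          omega
        · simp only [pvPos, hk, if_neg hm, if_neg h₁n, if_neg h₂n,
            Option.map_eq_some_iff] at h₁ h₂
          rcases h₁ with ⟨j₁, hj₁, he₁⟩
          rcases h₂ with ⟨j₂, hj₂, he₂⟩
          have hj : j₁ = j₂ := by omega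
          exact ih _ j₁ hj₁ (hj ▸ hj₂)

-- the main invariant, by induction on p from the right
theorem pvMain (k : String → Option String) (t : String → String) (p : List String) :
    (p.foldl (pvAStep k t) ([], PySem.Dict.empty)).1
        = pvTailOut k (p.foldl (pvAccStep k t) PySem.Dict.empty) ([] : PySem.Set String) p
    ∧ (∀ n, PySem.Dict.get? (p.foldl (pvAStep k t) ([], PySem.Dict.empty)).2 n
        = pvPos k ([] : PySem.Set String) n p)
    ∧ (∀ n, PySem.Dict.get? (p.foldl (pvAccStep k t) PySem.Dict.empty) n = none
        ↔ pvPos k ([] : PySem.Set String) n p = none)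
    ∧ (∀ n i, pvPos k ([] : PySem.Set String) n p = some i →
        i < (pvTailOut k (p.foldl (pvAccStep k t) PySem.Dict.empty) ([] : PySem.Set String) p).length
        ∧ (pvTailOut k (p.foldl (pvAccStep k t) PySem.Dict.empty) ([] : PySem.Set String) p).getD i ""
            = PySem.Dict.getD (p.foldl (pvAccStep k t) PySem.Dict.empty) n "") := by
  induction p using List.reverseRecOn with
  | nil =>
    refine ⟨rfl, ?_, ?_, ?_⟩
    · intro n; simp [pvPos, PySem.Dict.get?_empty]
    · intro n; simp [pvPos, PySem.Dict.get?_empty]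
    · intro n i h; simp [pvPos] at h
  | append_singleton p x ih =>
    obtain ⟨ih1, ih2, ih3, ih4⟩ := ih
    cases hkx : k x with
    | none =>
      have hacc : pvAccStep k t (p.foldl (pvAccStep k t) PySem.Dict.empty) x
          = p.foldl (pvAccStep k t) PySem.Dict.empty := by
        simp [pvAccStep, hkx]
      have hout : pvTailOut k (p.foldl (pvAccStep k t) PySem.Dict.empty) ([] : PySem.Set String) (p ++ [x])
          = pvTailOut k (p.foldl (pvAccStep k t) PySem.Dict.empty) ([] : PySem.Set String) p ++ [x] := by
        rw [pvTailOut_append]; simp [pvTailOut, hkx]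
      have hpos : ∀ n, pvPos k ([] : PySem.Set String) n (p ++ [x]) = pvPos k ([] : PySem.Set String) n p := by
        intro n
        rw [pvPos_append k n p [x] ([] : PySem.Set String) (p.foldl (pvAccStep k t) PySem.Dict.empty)]
        simp [pvPos, hkx]
      refine ⟨?_, ?_, ?_, ?_⟩
      · simp only [List.foldl_append, List.foldl_cons, List.foldl_nil, pvAStep, hkx]
        rw [hacc, hout, ih1]
      · intro n
        simp only [List.foldl_append, List.foldl_cons, List.foldl_nil, pvAStep, hkx]
        rw [hpos n]; exact ih2 n
      · intro n
        simp only [List.foldl_append, List.foldl_cons, List.foldl_nil]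
        rw [hacc, hpos n]; exact ih3 n
      · intro n i h
        rw [hpos n] at h
        obtain ⟨hlt, hget⟩ := ih4 n i h
        simp only [List.foldl_append, List.foldl_cons, List.foldl_nil]
        rw [hacc, hout]
        constructor
        · rw [List.length_append]; simp only [List.length_cons, List.length_nil]; omega
        · rw [List.getD_append _ _ _ _ hlt, hget]
    | some n₀ =>
      have h0 : (n₀ : String) ∉ (([] : PySem.Set String) : PySem.Set String) := List.not_mem_nil
      cases hA2 : PySem.Dict.get? (p.foldl (pvAStep k t) ([], PySem.Dict.empty)).2 n₀ with
      | some idx =>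
        have hP : pvPos k ([] : PySem.Set String) n₀ p = some idx := by rw [← ih2 n₀]; exact hA2
        cases hv : PySem.Dict.get? (p.foldl (pvAccStep k t) PySem.Dict.empty) n₀ with
        | none => exact absurd ((ih3 n₀).mp hv) (by rw [hP]; simp)
        | some v =>
        have hmem : n₀ ∈ pvEmAcc k ([] : PySem.Set String) p :=
          (pvEmAcc_mem k n₀ p ([] : PySem.Set String) h0).mpr (by rw [hP]; simp)
        have hacc : pvAccStep k t (p.foldl (pvAccStep k t) PySem.Dict.empty) x
            = PySem.Dict.insert (p.foldl (pvAccStep k t) PySem.Dict.empty) n₀ (v ++ t x) := by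
          simp [pvAccStep, hkx, hv]
        have hout : pvTailOut k (PySem.Dict.insert (p.foldl (pvAccStep k t) PySem.Dict.empty) n₀ (v ++ t x)) ([] : PySem.Set String) (p ++ [x])
            = (pvTailOut k (p.foldl (pvAccStep k t) PySem.Dict.empty) ([] : PySem.Set String) p).set idx (v ++ t x) := by
          rw [pvTailOut_append, pvKEY k _ n₀ (v ++ t x) p ([] : PySem.Set String) h0, hP]
          simp [pvTailOut, hkx, hmem]
        have hpos : ∀ n, pvPos k ([] : PySem.Set String) n (p ++ [x]) = pvPos k ([] : PySem.Set String) n p := by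
          intro n
          rw [pvPos_append k n p [x] ([] : PySem.Set String) (p.foldl (pvAccStep k t) PySem.Dict.empty)]
          simp [pvPos, hkx, hmem]
        have hgv : PySem.Dict.getD (p.foldl (pvAccStep k t) PySem.Dict.empty) n₀ "" = v :=
          PySem.Dict.getD_of_get?_eq_some _ "" hv
        obtain ⟨hidxlt, hidxget⟩ := ih4 n₀ idx hP
        refine ⟨?_, ?_, ?_, ?_⟩
        · simp only [List.foldl_append, List.foldl_cons, List.foldl_nil, pvAStep, hkx, hA2]
          rw [hacc, hout, ih1]
          congr 1
          rw [hidxget, hgv]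
        · intro n
          simp only [List.foldl_append, List.foldl_cons, List.foldl_nil, pvAStep, hkx, hA2]
          rw [hpos n]; exact ih2 n
        · intro n
          simp only [List.foldl_append, List.foldl_cons, List.foldl_nil]
          rw [hacc, hpos n]
          by_cases hn : n = n₀
          · subst hn
            simp [PySem.Dict.get?_insert_self, hP]
          · rw [PySem.Dict.get?_insert_of_ne _ _ hn]; exact ih3 n
        · intro n i h
          rw [hpos n] at h
          obtain ⟨hlt, hget⟩ := ih4 n i h
          simp only [List.foldl_append, List.foldl_cons, List.foldl_nil]
          rw [hacc, hout]
          by_cases hn : n = n₀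
          · subst hn
            rw [hP] at h
            obtain rfl : idx = i := Option.some_inj.mp h
            constructor
            · rw [List.length_set]; exact hlt
            · rw [PySem.Dict.getD_insert_self]
              rw [List.getD_eq_getElem?_getD, List.getElem?_set_self (by exact hlt)]
              rfl
          · have hne : i ≠ idx := fun he =>
              hn (pvPos_inj k n n₀ p ([] : PySem.Set String) i h (he ▸ hP))
            constructor
            · rw [List.length_set]; exact hlt
            · rw [PySem.Dict.getD_insert_of_ne _ _ _ hn]
              rw [List.getD_eq_getElem?_getD, List.getElem?_set_ne (by omega : idx ≠ i),
                ← List.getD_eq_getElem?_getD, hget]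
      | none =>
        have hP : pvPos k ([] : PySem.Set String) n₀ p = none := by rw [← ih2 n₀]; exact hA2
        have hv : PySem.Dict.get? (p.foldl (pvAccStep k t) PySem.Dict.empty) n₀ = none :=
          (ih3 n₀).mpr hP
        have hmem : n₀ ∉ pvEmAcc k ([] : PySem.Set String) p := fun hm =>
          ((pvEmAcc_mem k n₀ p ([] : PySem.Set String) h0).mp hm) hP
        have hacc : pvAccStep k t (p.foldl (pvAccStep k t) PySem.Dict.empty) x
            = PySem.Dict.insert (p.foldl (pvAccStep k t) PySem.Dict.empty) n₀ x := by
          simp [pvAccStep, hkx, hv]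
        have hout : pvTailOut k (PySem.Dict.insert (p.foldl (pvAccStep k t) PySem.Dict.empty) n₀ x) ([] : PySem.Set String) (p ++ [x])
            = pvTailOut k (p.foldl (pvAccStep k t) PySem.Dict.empty) ([] : PySem.Set String) p ++ [x] := by
          rw [pvTailOut_append, pvKEY k _ n₀ x p ([] : PySem.Set String) h0, hP]
          simp [pvTailOut, hkx, hmem, PySem.Dict.getD_insert_self]
        have hpos : ∀ n, pvPos k ([] : PySem.Set String) n (p ++ [x])
            = if n = n₀
              then some (pvTailOut k (p.foldl (pvAccStep k t) PySem.Dict.empty) ([] : PySem.Set String) p).length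
              else pvPos k ([] : PySem.Set String) n p := by
          intro n
          rw [pvPos_append k n p [x] ([] : PySem.Set String) (p.foldl (pvAccStep k t) PySem.Dict.empty)]
          by_cases hn : n = n₀
          · subst hn; simp [pvPos, hkx, hmem, hP]
          · simp [pvPos, hkx, hmem, hn, Ne.symm hn]
        have hlen : (p.foldl (pvAStep k t) ([], PySem.Dict.empty)).1.length
            = (pvTailOut k (p.foldl (pvAccStep k t) PySem.Dict.empty) ([] : PySem.Set String) p).length := by
          rw [ih1]
        refine ⟨?_, ?_, ?_, ?_⟩
        · simp only [List.foldl_append, List.foldl_cons, List.foldl_nil, pvAStep, hkx, hA2]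
          rw [hacc, hout, ih1]
        · intro n
          simp only [List.foldl_append, List.foldl_cons, List.foldl_nil, pvAStep, hkx, hA2]
          rw [hpos n]
          by_cases hn : n = n₀
          · subst hn
            rw [PySem.Dict.get?_insert_self, if_pos rfl, hlen]
          · rw [PySem.Dict.get?_insert_of_ne _ _ hn, if_neg hn]; exact ih2 n
        · intro n
          simp only [List.foldl_append, List.foldl_cons, List.foldl_nil]
          rw [hacc, hpos n]
          by_cases hn : n = n₀
          · subst hn; simp [PySem.Dict.get?_insert_self]
          · rw [PySem.Dict.get?_insert_of_ne _ _ hn, if_neg hn]; exact ih3 n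
        · intro n i h
          rw [hpos n] at h
          simp only [List.foldl_append, List.foldl_cons, List.foldl_nil]
          rw [hacc, hout]
          by_cases hn : n = n₀
          · subst hn
            rw [if_pos rfl] at h
            obtain rfl : (pvTailOut k (p.foldl (pvAccStep k t) PySem.Dict.empty) ([] : PySem.Set String) p).length = i :=
              Option.some_inj.mp h
            constructor
            · rw [List.length_append]; simp only [List.length_cons, List.length_nil]; omega
            · rw [PySem.Dict.getD_insert_self]
              rw [List.getD_eq_getElem?_getD, List.getElem?_append_right (Nat.le_refl _)]
              simp
          · rw [if_neg hn] at h
            obtain ⟨hlt, hget⟩ := ih4 n i h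
            constructor
            · rw [List.length_append]; simp only [List.length_cons, List.length_nil]; omega
            · rw [PySem.Dict.getD_insert_of_ne _ _ _ hn, List.getD_append _ _ _ _ hlt, hget]

-- ===== VERDICT (by name: the statement is the Claim_ definition above) =====
theorem concatenate_cmdline_variables_spec : Claim_equal_concatenate_cmdline_variables := by
  intro src names _
  unfold Spec_concatenate_cmdline_variables
  unfold concatenate_cmdline_variables concatenate_cmdline_variables_alt
  have hA : src.foldl (pvStepA names) ([], PySem.Dict.empty)
      = src.foldl (pvAStep (pvKey names) pvTail) ([], PySem.Dict.empty) := by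
    congr 1; funext st item; exact pvStepA_eq names st item
  have hAcc : src.foldl (pvStepAcc names) PySem.Dict.empty
      = src.foldl (pvAccStep (pvKey names) pvTail) PySem.Dict.empty := by
    congr 1; funext acc item; exact pvStepAcc_eq names acc item
  have hE : ∀ acc, src.foldl (pvStepEmit names acc) ([], PySem.Set.empty)
      = src.foldl (pvEStep (pvKey names) acc) ([], PySem.Set.empty) := by
    intro acc; congr 1; funext st item; exact pvStepEmit_eq names acc st item
  rw [hA]
  show _ = (src.foldl (pvStepEmit names (src.foldl (pvStepAcc names) PySem.Dict.empty)) ([], PySem.Set.empty)).1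
  rw [hAcc, hE, pvEStep_out]
  simpa using (pvMain (pvKey names) pvTail src).1
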